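-- pv_equiv track=rewrite | github.com/CPSC491FileMaker/project | handleLists.py | recordsForARange
-- ===== SOURCE A (Python) =====
-- def recordsForARange(rangeOfDates,allRecords):
--   relaventRecords = []
--   for date in rangeOfDates:
--     for record in allRecords:
--       if(date <= record[1] and date >= record[0]):
--         if record not in relaventRecords:
--           relaventRecords.append(record)
--   return relaventRecords
-- ===== SOURCE B (Python) =====
-- def recordsForARange(rangeOfDates, allRecords):
--     # Worklist decomposition: each date consumes its first-time matchers from a
--     # shrinking pool, so records are matched once (at their first overlapping date)
--     # instead of being rescanned and re-filtered through the result on every date.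
--     out = []
--     remaining = allRecords
--     for d in rangeOfDates:
--         hits = [r for r in remaining if r[0] <= d <= r[1]]
--         remaining = [r for r in remaining if not (r[0] <= d <= r[1])]
--         for r in hits:
--             if r not in out:
--                 out.append(r)
--     return out
-- ===== Notes on version B (the rewrite author's own statement) =====
-- stated objective: alternative
-- what changed: Instead of rescanning all records for every date and deduplicating re-hits through the growing result, B keeps a shrinking pool of unmatched records, partitions it at each date into first-time hits and the rest, and appends the hits (value-deduplicated) in date order.
import Mathlib
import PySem

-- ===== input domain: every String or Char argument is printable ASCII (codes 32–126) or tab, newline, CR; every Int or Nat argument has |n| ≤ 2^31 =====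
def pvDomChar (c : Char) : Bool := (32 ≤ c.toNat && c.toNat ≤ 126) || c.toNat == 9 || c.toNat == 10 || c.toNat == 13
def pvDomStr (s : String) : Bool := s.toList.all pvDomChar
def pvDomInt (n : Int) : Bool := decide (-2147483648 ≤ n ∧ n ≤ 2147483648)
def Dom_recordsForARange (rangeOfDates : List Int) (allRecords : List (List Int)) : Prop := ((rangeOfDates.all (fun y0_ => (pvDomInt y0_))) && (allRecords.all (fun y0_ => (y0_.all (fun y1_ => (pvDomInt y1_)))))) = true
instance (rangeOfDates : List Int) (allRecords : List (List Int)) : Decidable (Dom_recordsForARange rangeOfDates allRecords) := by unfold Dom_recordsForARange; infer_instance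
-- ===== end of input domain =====

-- B replaces A's per-date rescan of all records (deduplicating re-hits through the
-- growing result) by a shrinking pool of unmatched records partitioned at each date;
-- a genuinely different traversal, same cost class (objective: alternative).


-- ===== PORT A =====
-- record[1] / record[0] ported with pyGetD (exact under Pre_, which guarantees the
-- indices are in range whenever they are evaluated).
def recordsForARange (rangeOfDates : List Int) (allRecords : List (List Int)) : List (List Int) :=
  rangeOfDates.foldl (fun relaventRecords date =>
    allRecords.foldl (fun acc record =>
      if date ≤ PySem.List.pyGetD record 1 0 ∧ PySem.List.pyGetD record 0 0 ≤ date then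
        if record ∈ acc then acc else acc ++ [record]
      else acc) relaventRecords) []

-- ===== PORT B =====
-- state = (remaining pool, out); r[0] <= d <= r[1] ported with pyGetD (exact under Pre_).
def recordsForARange_alt (rangeOfDates : List Int) (allRecords : List (List Int)) : List (List Int) :=
  (rangeOfDates.foldl (fun (st : List (List Int) × List (List Int)) d =>
      let hits := st.1.filter (fun r => decide (PySem.List.pyGetD r 0 0 ≤ d ∧ d ≤ PySem.List.pyGetD r 1 0))
      let rem := st.1.filter (fun r => !decide (PySem.List.pyGetD r 0 0 ≤ d ∧ d ≤ PySem.List.pyGetD r 1 0))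
      (rem, hits.foldl (fun out r => if r ∈ out then out else out ++ [r]) st.2))
    (allRecords, [])).2

-- ===== PRECONDITION & SPEC =====
-- Pre_ excludes exactly the inputs where A raises IndexError: a nonempty date range
-- together with some record of fewer than 2 entries.
def Pre_recordsForARange (rangeOfDates : List Int) (allRecords : List (List Int)) : Prop :=
  rangeOfDates = [] ∨ ∀ r ∈ allRecords, 2 ≤ r.length
instance (rangeOfDates : List Int) (allRecords : List (List Int)) : Decidable (Pre_recordsForARange rangeOfDates allRecords) := by unfold Pre_recordsForARange; infer_instance

def pvWitness_recordsForARange : List Int × List (List Int) := ([0, 1, 2], [[1, 2], [0, 0], [1, 2]])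

def Spec_recordsForARange (rangeOfDates : List Int) (allRecords : List (List Int)) (out : List (List Int)) : Prop := out = recordsForARange_alt rangeOfDates allRecords
instance (rangeOfDates : List Int) (allRecords : List (List Int)) (out : List (List Int)) : Decidable (Spec_recordsForARange rangeOfDates allRecords out) := by unfold Spec_recordsForARange; infer_instance

-- ===== CLAIM (what is proved, stated in full; the proofs are below) =====
def Claim_equal_recordsForARange : Prop := ∀ (rangeOfDates : List Int) (allRecords : List (List Int)), Dom_recordsForARange rangeOfDates allRecords → Pre_recordsForARange rangeOfDates allRecords → Spec_recordsForARange rangeOfDates allRecords (recordsForARange rangeOfDates allRecords)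
-- ===== LEMMAS AND PROOFS =====

def pvMtch (d : Int) (r : List Int) : Bool :=
  decide (PySem.List.pyGetD r 0 0 ≤ d ∧ d ≤ PySem.List.pyGetD r 1 0)

def pvIns (a : List (List Int)) (r : List Int) : List (List Int) :=
  if r ∈ a then a else a ++ [r]

-- A's per-date pass over all records, rewritten through filter.
theorem pv_inner_eq (d : Int) : ∀ (recs : List (List Int)) (acc : List (List Int)),
    recs.foldl (fun acc record =>
      if d ≤ PySem.List.pyGetD record 1 0 ∧ PySem.List.pyGetD record 0 0 ≤ d then
        if record ∈ acc then acc else acc ++ [record]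
      else acc) acc
      = (recs.filter (pvMtch d)).foldl pvIns acc := by
  intro recs
  induction recs with
  | nil => intro acc; rfl
  | cons r rs ih =>
    intro acc
    rw [List.foldl_cons, List.filter_cons]
    by_cases h : PySem.List.pyGetD r 0 0 ≤ d ∧ d ≤ PySem.List.pyGetD r 1 0
    · have hm : pvMtch d r = true := by simp [pvMtch, h.1, h.2]
      rw [if_pos ⟨h.2, h.1⟩, hm, if_pos rfl, List.foldl_cons, ih]
      rfl
    · have h' : ¬ (d ≤ PySem.List.pyGetD r 1 0 ∧ PySem.List.pyGetD r 0 0 ≤ d) :=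
        fun hc => h ⟨hc.2, hc.1⟩
      have hm : pvMtch d r = false := by
        simp only [pvMtch, decide_eq_false_iff_not]; exact h
      rw [if_neg h', hm, if_neg Bool.false_ne_true]
      exact ih acc

theorem pv_mem_ins {r s : List Int} {a : List (List Int)} (h : r ∈ a) : r ∈ pvIns a s := by
  simp only [pvIns]
  split
  · exact h
  · exact List.mem_append_left _ h

theorem pv_mem_foldl_ins {r : List Int} : ∀ (l : List (List Int)) (a : List (List Int)),
    r ∈ a → r ∈ l.foldl pvIns a := by
  intro l
  induction l with
  | nil => intro a h; exact h
  | cons x xs ih => intro a h; exact ih _ (pv_mem_ins h)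

theorem pv_self_mem_foldl_ins {r : List Int} : ∀ (l : List (List Int)) (a : List (List Int)),
    r ∈ l → r ∈ l.foldl pvIns a := by
  intro l
  induction l with
  | nil => intro a h; cases h
  | cons x xs ih =>
    intro a h
    rcases List.mem_cons.mp h with h | h
    · subst h
      rw [List.foldl_cons]
      apply pv_mem_foldl_ins
      by_cases hx : r ∈ a
      · have e : pvIns a r = a := if_pos hx
        rw [e]; exact hx
      · have e : pvIns a r = a ++ [r] := if_neg hx
        rw [e]; exact List.mem_append_right _ (List.mem_singleton.mpr rfl)
    · exact ih _ h

theorem pv_ins_of_mem {r : List Int} {a : List (List Int)} (h : r ∈ a) : pvIns a r = a := by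
  simp [pvIns, h]

-- dropping already-present elements from a dedup-fold changes nothing
theorem pv_foldl_ins_filter (p : List Int → Bool) : ∀ (l : List (List Int)) (acc : List (List Int)),
    (∀ r ∈ l, p r = false → r ∈ acc) →
    l.foldl pvIns acc = (l.filter p).foldl pvIns acc := by
  intro l
  induction l with
  | nil => intro acc _; rfl
  | cons x xs ih =>
    intro acc h
    by_cases hp : p x = true
    · rw [List.foldl_cons, List.filter_cons, hp, if_pos rfl, List.foldl_cons]
      exact ih _ (fun r hr hpr => pv_mem_ins (h r (List.mem_cons_of_mem _ hr) hpr))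
    · have hpf : p x = false := by simpa using hp
      have hx : x ∈ acc := h x List.mem_cons_self hpf
      rw [List.foldl_cons, List.filter_cons, hpf, if_neg Bool.false_ne_true, pv_ins_of_mem hx]
      exact ih _ (fun r hr hpr => h r (List.mem_cons_of_mem _ hr) hpr)

def pvAloop (dates : List Int) (recs : List (List Int)) (acc : List (List Int)) : List (List Int) :=
  dates.foldl (fun a d => (recs.filter (pvMtch d)).foldl pvIns a) acc

theorem pv_filter_swap (p q : List Int → Bool) (l : List (List Int)) :
    (l.filter p).filter q = (l.filter q).filter p := by
  rw [List.filter_filter, List.filter_filter]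
  apply List.filter_congr
  intro a _
  rw [Bool.and_comm]

-- records already (by value) in acc may be removed from the pool without changing A's loop
theorem pv_skip (d0 : Int) : ∀ (ds : List Int) (recs acc : List (List Int)),
    (∀ r ∈ recs, pvMtch d0 r = true → r ∈ acc) →
    pvAloop ds recs acc = pvAloop ds (recs.filter (fun r => ! pvMtch d0 r)) acc := by
  intro ds
  induction ds with
  | nil => intro recs acc _; rfl
  | cons d dsTail ih =>
    intro recs acc h
    show pvAloop dsTail recs ((recs.filter (pvMtch d)).foldl pvIns acc)
        = pvAloop dsTail (recs.filter (fun r => ! pvMtch d0 r))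
            (((recs.filter (fun r => ! pvMtch d0 r)).filter (pvMtch d)).foldl pvIns acc)
    have hacc : ((recs.filter (fun r => ! pvMtch d0 r)).filter (pvMtch d)).foldl pvIns acc
        = (recs.filter (pvMtch d)).foldl pvIns acc := by
      rw [pv_filter_swap]
      exact (pv_foldl_ins_filter (fun r => ! pvMtch d0 r) (recs.filter (pvMtch d)) acc
        (fun r hr hpr => h r (List.mem_of_mem_filter hr) (by simpa using hpr))).symm
    rw [hacc, ih]
    intro r hr hm
    exact pv_mem_foldl_ins _ _ (h r hr hm)

-- main loop correspondence: A's date loop equals B's pool loop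
theorem pv_main : ∀ (dates : List Int) (recs acc : List (List Int)),
    pvAloop dates recs acc
      = (dates.foldl (fun (st : List (List Int) × List (List Int)) d =>
          (st.1.filter (fun r => ! pvMtch d r),
           (st.1.filter (pvMtch d)).foldl pvIns st.2)) (recs, acc)).2 := by
  intro dates
  induction dates with
  | nil => intro recs acc; rfl
  | cons d ds ih =>
    intro recs acc
    show pvAloop ds recs ((recs.filter (pvMtch d)).foldl pvIns acc)
        = (ds.foldl _ (recs.filter (fun r => ! pvMtch d r), (recs.filter (pvMtch d)).foldl pvIns acc)).2
    rw [pv_skip d ds recs _ (fun r hr hm => pv_self_mem_foldl_ins _ _ (List.mem_filter.mpr ⟨hr, hm⟩))]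
    exact ih _ _

theorem pv_A_eq_aux (recs : List (List Int)) : ∀ (dates : List Int) (acc : List (List Int)),
    dates.foldl (fun relaventRecords date =>
      recs.foldl (fun acc record =>
        if date ≤ PySem.List.pyGetD record 1 0 ∧ PySem.List.pyGetD record 0 0 ≤ date then
          if record ∈ acc then acc else acc ++ [record]
        else acc) relaventRecords) acc
      = pvAloop dates recs acc := by
  intro dates
  induction dates with
  | nil => intro acc; rfl
  | cons d ds ih =>
    intro acc
    show _ = pvAloop ds recs ((recs.filter (pvMtch d)).foldl pvIns acc)
    rw [List.foldl_cons, pv_inner_eq]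
    exact ih _

theorem pv_A_eq (dates : List Int) (recs : List (List Int)) :
    recordsForARange dates recs = pvAloop dates recs [] := by
  unfold recordsForARange
  exact pv_A_eq_aux recs dates []

theorem pv_B_eq (dates : List Int) (recs : List (List Int)) :
    recordsForARange_alt dates recs
      = (dates.foldl (fun (st : List (List Int) × List (List Int)) d =>
          (st.1.filter (fun r => ! pvMtch d r),
           (st.1.filter (pvMtch d)).foldl pvIns st.2)) (recs, [])).2 := by
  rfl

-- ===== VERDICT (by name: the statement is the Claim_ definition above) =====
theorem recordsForARange_spec : Claim_equal_recordsForARange := by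
  intro dates recs _ _
  unfold Spec_recordsForARange
  rw [pv_A_eq, pv_B_eq, pv_main]
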